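-- pv_equiv track=rewrite | github.com/yulonglin/articulating-learned-rules | src/generate_datasets.py | eval_contains_digit_pattern
-- ===== SOURCE A (Python) =====
-- def eval_contains_digit_pattern(text: str) -> bool:
--     """Check if text contains exactly three consecutive digits."""
--     import re
--     # Match exactly 3 consecutive digits surrounded by non-digits (including start/end)
--     # This matches the examples: "456" in "Code: 456" but not "001" in "Serial 001"
--     # because 001 has leading zeros making it ambiguous
--     for i in range(len(text) - 2):
--         if text[i:i+3].isdigit():
--             # Check it's exactly 3 digits
--             has_digit_before = i > 0 and text[i-1].isdigit()
--             has_digit_after = i + 3 < len(text) and text[i+3].isdigit()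
--             if not has_digit_before and not has_digit_after:
--                 # Also check the three digits are not all zeros (based on "Serial 001" example)
--                 if text[i:i+3] != '000':
--                     return True
--     return False
-- ===== SOURCE B (Python) =====
-- def eval_contains_digit_pattern(text: str) -> bool:
--     """Check if text contains exactly three consecutive digits."""
--     i, n = 0, len(text)
--     while i < n:
--         if text[i].isdigit():
--             j = i
--             while j < n and text[j].isdigit():
--                 j += 1
--             # text[i:j] is a maximal run of digits
--             if j - i == 3 and text[i:j] != '000':
--                 return True
--             i = j
--         else:
--             i += 1
--     return False
-- ===== Notes on version B (the rewrite author's own statement) =====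
-- stated objective: alternative
-- what changed: Replaced A's sliding-window scan (test every index for a 3-digit slice plus digit-boundary checks on both sides) by a single pass over maximal digit runs: advance to each run, measure its length once, and accept a run iff it has length exactly 3 and is not the all-zeros run.
import Mathlib
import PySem

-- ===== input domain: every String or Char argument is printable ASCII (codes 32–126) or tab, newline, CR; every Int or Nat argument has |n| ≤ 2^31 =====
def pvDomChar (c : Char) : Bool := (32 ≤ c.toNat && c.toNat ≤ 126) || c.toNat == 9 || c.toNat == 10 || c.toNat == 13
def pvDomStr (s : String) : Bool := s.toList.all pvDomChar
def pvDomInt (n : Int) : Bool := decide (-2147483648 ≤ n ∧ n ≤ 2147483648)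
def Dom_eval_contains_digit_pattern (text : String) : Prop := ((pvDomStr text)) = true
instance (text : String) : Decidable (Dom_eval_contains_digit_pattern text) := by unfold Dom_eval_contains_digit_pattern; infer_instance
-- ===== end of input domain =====

-- B replaces A's sliding-window scan over all indices by a single pass over maximal
-- digit runs (objective: alternative decomposition, same cost).

-- ===== PORT A =====
def eval_contains_digit_pattern (text : String) : Bool :=
  let cs := text.toList
  (PySem.List.pyRange 0 ((cs.length : Int) - 2)).any fun i =>
    let tri := PySem.List.slice cs (some i) (some (i + 3))
    if PySem.Chars.strIsdigit tri then
      let hasDigitBefore :=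
        decide (0 < i) && (((PySem.List.pyGet? cs (i - 1)).map PySem.Chars.isdigit).getD false)
      let hasDigitAfter :=
        decide (i + 3 < (cs.length : Int)) && (((PySem.List.pyGet? cs (i + 3)).map PySem.Chars.isdigit).getD false)
      if !hasDigitBefore && !hasDigitAfter then
        decide (tri ≠ ['0', '0', '0'])
      else false
    else false

-- ===== PORT B =====
-- one pass over maximal digit runs (the inner `while j` loop is takeWhile/dropWhile)
def pvRunScan (cs : List Char) : Bool :=
  match cs with
  | [] => false
  | c :: t =>
    if PySem.Chars.isdigit c then
      let run := List.takeWhile PySem.Chars.isdigit (c :: t)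
      let rest := List.dropWhile PySem.Chars.isdigit (c :: t)
      if run.length = 3 ∧ run ≠ ['0', '0', '0'] then true
      else pvRunScan rest
    else pvRunScan t
termination_by cs.length
decreasing_by
  · simp only [List.dropWhile_cons, *, if_pos]
    have := List.length_dropWhile_le PySem.Chars.isdigit t
    simp only [List.length_cons]; omega
  · simp

def eval_contains_digit_pattern_alt (text : String) : Bool :=
  pvRunScan text.toList

-- ===== PRECONDITION & SPEC =====
def Spec_eval_contains_digit_pattern (text : String) (out : Bool) : Prop := out = eval_contains_digit_pattern_alt text
instance (text : String) (out : Bool) : Decidable (Spec_eval_contains_digit_pattern text out) := by unfold Spec_eval_contains_digit_pattern; infer_instance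

-- ===== CLAIM (what is proved, stated in full; the proofs are below) =====
def Claim_equal_eval_contains_digit_pattern : Prop := ∀ (text : String), Dom_eval_contains_digit_pattern text → Spec_eval_contains_digit_pattern text (eval_contains_digit_pattern text)

-- ===== LEMMAS AND PROOFS =====

-- "cs contains a maximal digit run of length exactly 3 that is not 000"
def pvExD (cs : List Char) : Prop :=
  ∃ p q r : List Char, cs = p ++ q ++ r ∧ q.all PySem.Chars.isdigit = true ∧
    q.length = 3 ∧ q ≠ ['0', '0', '0'] ∧
    (∀ x, p.getLast? = some x → PySem.Chars.isdigit x = false) ∧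
    (∀ x, r.head? = some x → PySem.Chars.isdigit x = false)

lemma pvExD_cons_nondigit {c : Char} {t : List Char} (hc : PySem.Chars.isdigit c = false) :
    pvExD (c :: t) ↔ pvExD t := by
  constructor
  · rintro ⟨p, q, r, hcs, hall, hlen, hne, hlast, hhead⟩
    cases p with
    | nil =>
      exfalso
      cases q with
      | nil => simp at hlen
      | cons a q' =>
        simp at hcs
        have : PySem.Chars.isdigit a = true := by
          have := List.all_eq_true.mp hall a (by simp)
          simpa using this
        rw [hcs.1] at hc; rw [this] at hc; cases hc
    | cons a p' =>
      simp only [List.cons_append, List.cons.injEq] at hcs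
      refine ⟨p', q, r, hcs.2, hall, hlen, hne, ?_, hhead⟩
      intro x hx
      apply hlast
      rw [List.getLast?_cons, hx]; simp
  · rintro ⟨p, q, r, hcs, hall, hlen, hne, hlast, hhead⟩
    refine ⟨c :: p, q, r, by simp [hcs], hall, hlen, hne, ?_, hhead⟩
    intro x hx
    rw [List.getLast?_cons] at hx
    cases hp : p.getLast? with
    | none => rw [hp] at hx; simp at hx; rwa [← hx]
    | some y => rw [hp] at hx; simp at hx; exact hx ▸ hlast y hp

lemma pvExD_run (cs : List Char) :
    pvExD cs ↔
      ((List.takeWhile PySem.Chars.isdigit cs).length = 3 ∧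
        List.takeWhile PySem.Chars.isdigit cs ≠ ['0', '0', '0']) ∨
      pvExD (List.dropWhile PySem.Chars.isdigit cs) := by
  set d := PySem.Chars.isdigit with hdd
  have hsplit : List.takeWhile d cs ++ List.dropWhile d cs = cs := List.takeWhile_append_dropWhile
  have hresthead : ∀ x, (List.dropWhile d cs).head? = some x → d x = false := by
    intro x hx
    have := List.head?_dropWhile_not d cs
    rw [hx] at this; exact this
  constructor
  · rintro ⟨p, q, r, hcs, hall, hlen, hq0, hlast, hhead⟩
    cases hp : p with
    | nil =>
      left
      subst hp
      simp only [List.nil_append] at hcs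
      have htq : List.takeWhile d q = q :=
        List.takeWhile_eq_self_iff.mpr (fun x hx => List.all_eq_true.mp hall x hx)
      have htr : List.takeWhile d r = [] := by
        cases r with
        | nil => simp
        | cons y r' =>
          have : d y = false := hhead y rfl
          simp [this]
      have : List.takeWhile d cs = q := by
        rw [hcs, List.takeWhile_append]
        rw [htq]
        simp [htr]
      rw [this]; exact ⟨hlen, hq0⟩
    | cons a p' =>
      right
      subst hp
      have hplast : ∃ y, (a :: p').getLast? = some y ∧ d y = false := by
        cases hy : (a :: p').getLast? with
        | none => simp at hy
        | some y => exact ⟨y, rfl, hlast y hy⟩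
      obtain ⟨y, hy, hyd⟩ := hplast
      have hnotall : ¬ ((List.takeWhile d (a :: p')).length = (a :: p').length) := by
        intro hlenq
        have : List.takeWhile d (a :: p') = a :: p' :=
          (List.takeWhile_sublist d).eq_of_length hlenq
        have hall' : ∀ x ∈ (a :: p'), d x = true := by
          intro x hx
          have := List.takeWhile_eq_self_iff.mp this
          exact this x hx
        have : d y = true := hall' y (List.mem_of_getLast? hy)
        rw [this] at hyd; cases hyd
      have hdropne : List.dropWhile d (a :: p') ≠ [] := by
        intro hnil
        have := List.dropWhile_eq_nil_iff.mp hnil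
        have hself : List.takeWhile d (a :: p') = a :: p' :=
          List.takeWhile_eq_self_iff.mpr this
        exact hnotall (by rw [hself])
      have htake : List.takeWhile d cs = List.takeWhile d (a :: p') := by
        rw [hcs, List.append_assoc, List.takeWhile_append, if_neg hnotall]
      have hdrop : List.dropWhile d cs = List.dropWhile d (a :: p') ++ (q ++ r) := by
        rw [hcs, List.append_assoc, List.dropWhile_append,
          if_neg (by simpa [List.isEmpty_iff] using hdropne)]
      refine ⟨List.dropWhile d (a :: p'), q, r, by rw [hdrop, List.append_assoc], hall, hlen, hq0, ?_, hhead⟩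
      intro x hx
      have hlast2 : (a :: p').getLast? = (List.dropWhile d (a :: p')).getLast? := by
        conv_lhs => rw [← List.takeWhile_append_dropWhile (p := d) (l := a :: p')]
        rw [List.getLast?_append]
        cases hdl : (List.dropWhile d (a :: p')).getLast? with
        | none => exact absurd (List.getLast?_eq_none_iff.mp hdl) hdropne
        | some z => simp
      rw [← hlast2, hy] at hx
      simp at hx; rwa [← hx]
  · rintro (⟨h3, h0⟩ | ⟨p, q, r, hcs, hall, hlen, hq0, hlast, hhead⟩)
    · refine ⟨[], List.takeWhile d cs, List.dropWhile d cs, by simp, ?_, h3, h0, by simp, hresthead⟩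
      exact List.all_eq_true.mpr (fun x hx => List.mem_takeWhile_imp hx)
    · -- p must be nonempty: head of dropWhile is a non-digit, head of q is a digit
      have hpne : p ≠ [] := by
        intro hp
        subst hp
        cases q with
        | nil => simp at hlen
        | cons a q' =>
          have ha : d a = true := by
            have := List.all_eq_true.mp hall a (by simp); simpa using this
          have : (List.dropWhile d cs).head? = some a := by rw [hcs]; simp
          have := hresthead a this
          rw [ha] at this; cases this
      refine ⟨List.takeWhile d cs ++ p, q, r, ?_, hall, hlen, hq0, ?_, hhead⟩
      · rw [List.append_assoc, List.append_assoc,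
          show p ++ (q ++ r) = List.dropWhile d cs from by rw [hcs, List.append_assoc], hsplit]
      · intro x hx
        rw [List.getLast?_append] at hx
        cases hp : p.getLast? with
        | none => exact absurd (List.getLast?_eq_none_iff.mp hp) hpne
        | some y =>
          rw [hp] at hx; simp at hx
          exact hx ▸ hlast y hp

lemma pvRunScan_iff : ∀ (n : Nat) (cs : List Char), cs.length ≤ n →
    (pvRunScan cs = true ↔ pvExD cs) := by
  intro n
  induction n with
  | zero =>
    intro cs hcs
    have : cs = [] := List.eq_nil_of_length_eq_zero (Nat.le_zero.mp hcs)
    subst this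
    simp only [pvRunScan]
    constructor
    · intro h; cases h
    · rintro ⟨p, q, r, hcs, _, hlen, _, _, _⟩
      have hl := congrArg List.length hcs
      simp [hlen] at hl
      omega
  | succ m ih =>
    intro cs hcs
    cases cs with
    | nil =>
      exact ih [] (by simp)
    | cons c t =>
      by_cases hc : PySem.Chars.isdigit c = true
      · rw [show pvRunScan (c :: t) =
            (if (List.takeWhile PySem.Chars.isdigit (c :: t)).length = 3 ∧
                List.takeWhile PySem.Chars.isdigit (c :: t) ≠ ['0', '0', '0'] then true
             else pvRunScan (List.dropWhile PySem.Chars.isdigit (c :: t))) from by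
          rw [pvRunScan]; simp [hc]]
        rw [pvExD_run (c :: t)]
        by_cases hcond : (List.takeWhile PySem.Chars.isdigit (c :: t)).length = 3 ∧
            List.takeWhile PySem.Chars.isdigit (c :: t) ≠ ['0', '0', '0']
        · rw [if_pos hcond]
          exact ⟨fun _ => Or.inl hcond, fun _ => rfl⟩
        · simp only [if_neg hcond]
          have hlen : (List.dropWhile PySem.Chars.isdigit (c :: t)).length ≤ m := by
            have h1 : List.dropWhile PySem.Chars.isdigit (c :: t) =
                List.dropWhile PySem.Chars.isdigit t := by simp [hc]
            have := List.length_dropWhile_le PySem.Chars.isdigit t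
            rw [h1]; simp at hcs; omega
          rw [ih _ hlen]
          constructor
          · exact Or.inr
          · rintro (h | h)
            · exact absurd h hcond
            · exact h
      · rw [show pvRunScan (c :: t) = pvRunScan t from by
          rw [pvRunScan]; simp [hc]]
        rw [ih t (by simp at hcs; omega)]
        exact (pvExD_cons_nondigit (Bool.eq_false_iff.mpr hc)).symm

lemma pvA_iff (text : String) :
    eval_contains_digit_pattern text = true ↔ pvExD text.toList := by
  rw [eval_contains_digit_pattern]
  simp only [List.any_eq_true]
  generalize text.toList = cs
  constructor
  · rintro ⟨i, hmem, hcond⟩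
    rw [PySem.List.mem_pyRange_one] at hmem
    obtain ⟨hi0, hilt⟩ := hmem
    obtain ⟨n, hin⟩ : ∃ n : Nat, i = (n : Int) := ⟨i.toNat, by omega⟩
    subst hin
    have hnlen : n + 3 ≤ cs.length := by omega
    have htri : PySem.List.slice cs (some ((n : Int))) (some ((n : Int) + 3)) = (cs.drop n).take 3 := by
      rw [show ((n : Int) + 3) = ((n : Int) + ((3 : Nat) : Int)) from by norm_num,
        PySem.List.slice_natCast_add]
    rw [htri] at hcond
    have htrilen : ((cs.drop n).take 3).length = 3 := by
      simp [List.length_take, List.length_drop]; omega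
    by_cases hdig : PySem.Chars.strIsdigit ((cs.drop n).take 3) = true
    · rw [if_pos hdig] at hcond
      by_cases hbnd : (!(decide (0 < ((n : Int))) &&
            (((PySem.List.pyGet? cs ((n : Int) - 1)).map PySem.Chars.isdigit).getD false)) &&
          !(decide ((n : Int) + 3 < (cs.length : Int)) &&
            (((PySem.List.pyGet? cs ((n : Int) + 3)).map PySem.Chars.isdigit).getD false))) = true
      · rw [if_pos hbnd] at hcond
        have hne000 : (cs.drop n).take 3 ≠ ['0', '0', '0'] := of_decide_eq_true hcond
        have hall : ((cs.drop n).take 3).all PySem.Chars.isdigit = true := by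
          rw [PySem.Chars.strIsdigit, Bool.and_eq_true] at hdig
          exact hdig.2
        simp only [Bool.and_eq_true, Bool.not_eq_true', Bool.and_eq_false_iff] at hbnd
        refine ⟨cs.take n, (cs.drop n).take 3, cs.drop (n + 3), ?_, hall, htrilen, hne000, ?_, ?_⟩
        · rw [List.append_assoc,
            show (cs.drop n).take 3 ++ cs.drop (n + 3) = cs.drop n from by
              rw [show cs.drop (n + 3) = List.drop 3 (cs.drop n) from
                  (List.drop_drop (i := 3) (j := n) (l := cs)).symm,
                List.take_append_drop],
            List.take_append_drop]
        · intro x hx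
          rw [List.getLast?_take] at hx
          rcases hbnd.1 with h | h
          · have h' := of_decide_eq_false h
            have : n = 0 := by omega
            rw [if_pos this] at hx; cases hx
          · by_cases hn0 : n = 0
            · rw [if_pos hn0] at hx; cases hx
            · rw [if_neg hn0] at hx
              have hidx : cs[n - 1]? = some (cs[n - 1]'(by omega)) := List.getElem?_eq_getElem _
              rw [hidx] at hx
              rw [Option.some_or] at hx
              have hget : PySem.List.pyGet? cs ((n : Int) - 1) = some (cs[n - 1]'(by omega)) := by
                rw [show ((n : Int) - 1) = (((n - 1 : Nat)) : Int) from by omega,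
                  PySem.List.pyGet?_natCast, hidx]
              rw [hget] at h
              simp at h
              cases hx; exact h
        · intro x hx
          rw [List.head?_drop] at hx
          rcases hbnd.2 with h | h
          · have h' := of_decide_eq_false h
            have : cs[n + 3]? = none := List.getElem?_eq_none (by omega)
            rw [this] at hx; cases hx
          · have hget : PySem.List.pyGet? cs ((n : Int) + 3) = cs[n + 3]? := by
              rw [show ((n : Int) + 3) = (((n + 3 : Nat)) : Int) from by omega,
                PySem.List.pyGet?_natCast]
            rw [hget, hx] at h
            simpa using h
      · rw [if_neg hbnd] at hcond; cases hcond
    · rw [if_neg hdig] at hcond; cases hcond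
  · rintro ⟨p, q, r, hsplit, hall, hlen, hq0, hlast, hhead⟩
    set n := p.length with hn
    have hcslen : cs.length = n + 3 + r.length := by
      rw [hsplit]; simp [hlen]; omega
    refine ⟨(n : Int), ?_, ?_⟩
    · rw [PySem.List.mem_pyRange_one]
      constructor
      · positivity
      · rw [hcslen]; push_cast; omega
    · have htri : PySem.List.slice cs (some (n : Int)) (some ((n : Int) + 3)) = q := by
        rw [show ((n : Int) + 3) = ((n : Int) + ((3 : Nat) : Int)) from by norm_num,
          PySem.List.slice_natCast_add, hsplit, List.append_assoc, List.drop_left' hn.symm,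
          List.take_left' hlen]
      rw [htri]
      have hdig : PySem.Chars.strIsdigit q = true := by
        rw [PySem.Chars.strIsdigit, Bool.and_eq_true]
        refine ⟨?_, hall⟩
        cases q with
        | nil => simp at hlen
        | cons a q' => simp
      rw [if_pos hdig]
      have hbefore : (decide (0 < (n : Int)) &&
          (((PySem.List.pyGet? cs ((n : Int) - 1)).map PySem.Chars.isdigit).getD false)) = false := by
        by_cases hn0 : n = 0
        · rw [hn0]; simp
        · have hget : PySem.List.pyGet? cs ((n : Int) - 1) = p.getLast? := by
            rw [show ((n : Int) - 1) = (((n - 1 : Nat)) : Int) from by omega,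
              PySem.List.pyGet?_natCast, hsplit, List.append_assoc,
              List.getElem?_append_left (by omega),
              List.getLast?_eq_getElem?, hn]
          rw [hget]
          cases hp : p.getLast? with
          | none => simp
          | some y =>
            have := hlast y hp
            simp [this]
      have hafter : (decide ((n : Int) + 3 < (cs.length : Int)) &&
          (((PySem.List.pyGet? cs ((n : Int) + 3)).map PySem.Chars.isdigit).getD false)) = false := by
        cases hr : r with
        | nil =>
          have hl3 : cs.length = n + 3 := by rw [hcslen, hr]; simp
          rw [hl3]
          simp
        | cons y r' =>
          have hget : PySem.List.pyGet? cs ((n : Int) + 3) = some y := by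
            rw [show ((n : Int) + 3) = (((n + 3 : Nat)) : Int) from by omega,
              PySem.List.pyGet?_natCast, hsplit,
              List.getElem?_append_right (by simp [← hn, hlen]),
              show n + 3 - (p ++ q).length = 0 from by simp [← hn, hlen]]
            rw [hr]; simp
          rw [hget]
          have := hhead y (by rw [hr]; rfl)
          simp [this]
      rw [hbefore, hafter]
      simp only [Bool.not_false, Bool.and_self, if_pos]
      exact decide_eq_true hq0

-- ===== VERDICT (by name: the statement is the Claim_ definition above) =====
theorem eval_contains_digit_pattern_spec : Claim_equal_eval_contains_digit_pattern := by
  intro text _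
  show eval_contains_digit_pattern text = eval_contains_digit_pattern_alt text
  rw [Bool.eq_iff_iff, pvA_iff]
  rw [show eval_contains_digit_pattern_alt text = pvRunScan text.toList from rfl]
  exact (pvRunScan_iff text.toList.length text.toList le_rfl).symm
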